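-- pv_equiv track=rewrite | github.com/ankkittk/NotesEngine | src/agent/router.py | _contains_pronoun_reference
-- ===== SOURCE A (Python) =====
-- PRONOUNS = {
--     "it",
--     "this",
--     "that",
--     "them",
--     "those",
--     "these",
--     "its",
--     "their",
-- }
--
-- def _normalize(text: str) -> str:
--     return " ".join(
--         (text or "").strip().split()
--     ).lower()
--
-- def _contains_pronoun_reference(
--     query: str
-- ) -> bool:
--     q = f" {_normalize(query)} "
--
--     return any(
--         f" {p} " in q
--         for p in PRONOUNS
--     )
-- ===== SOURCE B (Python) =====
-- PRONOUNS = {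
--     "it",
--     "this",
--     "that",
--     "them",
--     "those",
--     "these",
--     "its",
--     "their",
-- }
--
--
-- def _contains_pronoun_reference(query: str) -> bool:
--     words = {w.lower() for w in query.split()}
--     return not PRONOUNS.isdisjoint(words)
-- ===== Notes on version B (the rewrite author's own statement) =====
-- stated objective: idiomatic
-- what changed: Instead of normalizing the query into a space-padded string and running a substring scan for every pronoun, B splits the query once into lower-cased words and tests set disjointness against PRONOUNS.
import Mathlib
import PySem

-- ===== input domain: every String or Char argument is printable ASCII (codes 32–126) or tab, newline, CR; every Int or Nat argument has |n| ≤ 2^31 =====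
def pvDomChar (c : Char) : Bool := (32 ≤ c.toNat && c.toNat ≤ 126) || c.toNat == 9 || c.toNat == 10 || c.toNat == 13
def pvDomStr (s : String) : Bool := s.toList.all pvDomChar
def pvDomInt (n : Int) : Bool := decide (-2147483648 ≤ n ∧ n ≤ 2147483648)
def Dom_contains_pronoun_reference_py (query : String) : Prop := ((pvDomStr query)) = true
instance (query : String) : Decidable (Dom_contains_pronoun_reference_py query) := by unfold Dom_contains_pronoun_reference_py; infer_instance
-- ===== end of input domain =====

-- B replaces A's per-pronoun substring scan of the padded normalized string by one split into
-- lower-cased words and a set-disjointness test against PRONOUNS (idiomatic rewrite, same results).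


-- ===== PORT A =====
-- module-level constant PRONOUNS (a Python set of strings), shared by both ports
def pvPronouns : PySem.Set String :=
  PySem.Set.ofList ["it", "this", "that", "them", "those", "these", "its", "their"]

-- _normalize: " ".join((text or "").strip().split()).lower()
-- ('text or ""' is the identity on str arguments: "" is falsy and maps to "")
def normalize_py (text : String) : String :=
  PySem.Str.lower (PySem.Str.join " " (PySem.Str.split₀ (PySem.Str.strip text)))

-- f" {x} " built on the character list (Lean's own String.append is opaque to the kernel)
def pvPad (s : String) : String := String.ofList (' ' :: s.toList ++ [' '])

def contains_pronoun_reference_py (query : String) : Bool :=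
  let q := pvPad (normalize_py query)
  pvPronouns.any (fun p => PySem.Str.isIn (pvPad p) q)

-- ===== PORT B =====
def contains_pronoun_reference_py_alt (query : String) : Bool :=
  let words : PySem.Set String :=
    PySem.Set.ofList ((PySem.Str.split₀ query).map PySem.Str.lower)
  ! pvPronouns.isdisjoint words

-- ===== PRECONDITION & SPEC =====
def Spec_contains_pronoun_reference_py (query : String) (out : Bool) : Prop := out = contains_pronoun_reference_py_alt query
instance (query : String) (out : Bool) : Decidable (Spec_contains_pronoun_reference_py query out) := by unfold Spec_contains_pronoun_reference_py; infer_instance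

-- ===== CLAIM (what is proved, stated in full; the proofs are below) =====
def Claim_equal_contains_pronoun_reference_py : Prop := ∀ (query : String), Dom_contains_pronoun_reference_py query → Spec_contains_pronoun_reference_py query (contains_pronoun_reference_py query)

-- ===== LEMMAS AND PROOFS =====

-- accumulator-free mirror of PySem.Chars.split₀.go (proof-side only)
def pvWords : List Char → List Char → List (List Char)
  | [], cur => if cur.isEmpty then [] else [cur.reverse]
  | c :: rest, cur =>
    if PySem.Chars.isspace c then
      if cur.isEmpty then pvWords rest [] else cur.reverse :: pvWords rest []
    else pvWords rest (c :: cur)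

lemma go_eq_pvWords (s cur : List Char) (acc : List (List Char)) :
    PySem.Chars.split₀.go s cur acc = acc.reverse ++ pvWords s cur := by
  induction s generalizing cur acc with
  | nil =>
    simp only [PySem.Chars.split₀.go, pvWords]
    split_ifs <;> simp
  | cons c rest ih =>
    simp only [PySem.Chars.split₀.go, pvWords]
    split_ifs <;> simp [ih]

lemma split₀_eq_pvWords (s : List Char) : PySem.Chars.split₀ s = pvWords s [] := by
  simpa using go_eq_pvWords s [] []

lemma pvWords_ok (s : List Char) :
    ∀ (cur : List Char), (∀ c ∈ cur, PySem.Chars.isspace c = false) →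
    ∀ w ∈ pvWords s cur, w ≠ [] ∧ ∀ c ∈ w, PySem.Chars.isspace c = false := by
  induction s with
  | nil =>
    intro cur hcur w hw
    simp only [pvWords] at hw
    split_ifs at hw with h
    · simp at hw
    · simp only [List.mem_singleton] at hw
      subst hw
      refine ⟨by simpa [List.isEmpty_iff] using h, fun c hc => hcur c (List.mem_reverse.mp hc)⟩
  | cons c rest ih =>
    intro cur hcur w hw
    simp only [pvWords] at hw
    split_ifs at hw with h1 h2
    · exact ih [] (by simp) w hw
    · rcases List.mem_cons.mp hw with rfl | hmem
      · refine ⟨by simpa [List.isEmpty_iff] using h2, fun c hc => hcur c (List.mem_reverse.mp hc)⟩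
      · exact ih [] (by simp) w hmem
    · refine ih (c :: cur) ?_ w hw
      intro x hx
      rcases List.mem_cons.mp hx with rfl | hx
      · simpa using h1
      · exact hcur x hx

lemma pvWords_dropWhile (s : List Char) :
    pvWords (List.dropWhile PySem.Chars.isspace s) [] = pvWords s [] := by
  induction s with
  | nil => rfl
  | cons c rest ih =>
    by_cases h : PySem.Chars.isspace c
    · simp [h, pvWords, ih]
    · simp [h]

lemma pvWords_allspace (t : List Char) (ht : ∀ c ∈ t, PySem.Chars.isspace c = true) :
    ∀ cur : List Char, pvWords t cur = if cur.isEmpty then [] else [cur.reverse] := by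
  induction t with
  | nil => intro cur; rfl
  | cons c t' ih =>
    intro cur
    have hs : PySem.Chars.isspace c = true := ht c (by simp)
    have h0 : pvWords t' [] = [] := by
      simpa using ih (fun x hx => ht x (List.mem_cons_of_mem _ hx)) []
    simp only [pvWords, hs, if_true]
    split_ifs <;> simp [h0]

lemma pvWords_append_space (t : List Char) (ht : ∀ c ∈ t, PySem.Chars.isspace c = true) :
    ∀ (s cur : List Char), pvWords (s ++ t) cur = pvWords s cur := by
  intro s
  induction s with
  | nil =>
    intro cur
    simp only [List.nil_append]
    rw [pvWords_allspace t ht cur]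
    rfl
  | cons c rest ih =>
    intro cur
    simp only [List.cons_append, pvWords]
    split_ifs <;> simp [ih]

lemma split₀_strip (s : List Char) :
    PySem.Chars.split₀ (PySem.Chars.strip s) = PySem.Chars.split₀ s := by
  rw [split₀_eq_pvWords, split₀_eq_pvWords]
  show pvWords (PySem.Chars.rstrip (PySem.Chars.lstrip s)) [] = pvWords s []
  set u := PySem.Chars.lstrip s with hu
  have h1 : pvWords u [] = pvWords s [] := pvWords_dropWhile s
  have ht : ∀ c ∈ (List.takeWhile PySem.Chars.isspace u.reverse).reverse,
      PySem.Chars.isspace c = true :=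
    fun c hc => List.mem_takeWhile_imp (List.mem_reverse.mp hc)
  have hdecomp : PySem.Chars.rstrip u ++ (List.takeWhile PySem.Chars.isspace u.reverse).reverse = u := by
    show (List.dropWhile PySem.Chars.isspace u.reverse).reverse ++ _ = u
    rw [← List.reverse_append, List.takeWhile_append_dropWhile, List.reverse_reverse]
  calc pvWords (PySem.Chars.rstrip u) []
      = pvWords (PySem.Chars.rstrip u ++ (List.takeWhile PySem.Chars.isspace u.reverse).reverse) [] :=
        (pvWords_append_space _ ht _ _).symm
    _ = pvWords u [] := by rw [hdecomp]
    _ = pvWords s [] := h1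

lemma lowerChar_nonspace (c : Char) (h : PySem.Chars.isspace c = false) :
    PySem.Chars.isspace (PySem.Chars.lowerChar c) = false := by
  unfold PySem.Chars.lowerChar
  split_ifs with hu
  · have hb : 65 ≤ c.toNat ∧ c.toNat ≤ 90 := by
      unfold PySem.Chars.isupper at hu
      simp only [Bool.and_eq_true, decide_eq_true_eq] at hu
      exact ⟨hu.1, hu.2⟩
    have hv : (c.toNat + 32).isValidChar := Or.inl (by omega)
    have htn : (Char.ofNat (c.toNat + 32)).toNat = c.toNat + 32 := by
      rw [Char.toNat_ofNat]; simp [hv]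
    unfold PySem.Chars.isspace
    simp only [htn]
    simp only [Bool.or_eq_false_iff, Bool.and_eq_false_iff, decide_eq_false_iff_not]
    omega
  · exact h

lemma lower_join (ps : List (List Char)) :
    PySem.Chars.lower (PySem.Chars.join [' '] ps) =
      PySem.Chars.join [' '] (ps.map PySem.Chars.lower) := by
  induction ps with
  | nil => simp [PySem.Chars.join_nil, PySem.Chars.lower]
  | cons a t ih =>
    cases t with
    | nil => simp [PySem.Chars.join_singleton]
    | cons b t' =>
      calc PySem.Chars.lower (PySem.Chars.join [' '] (a :: b :: t'))
          = PySem.Chars.lower a ++ [' '] ++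
              PySem.Chars.lower (PySem.Chars.join [' '] (b :: t')) := by
            have hc : PySem.Chars.lowerChar ' ' = ' ' := by decide
            rw [PySem.Chars.join_cons_cons]
            unfold PySem.Chars.lower
            simp [hc]
        _ = PySem.Chars.join [' '] (List.map PySem.Chars.lower (a :: b :: t')) := by
            rw [ih]
            simp only [List.map_cons]
            rw [PySem.Chars.join_cons_cons]

lemma eq_of_words (p : List Char) :
    ∀ (w v t : List Char), (∀ c ∈ p, PySem.Chars.isspace c = false) →
    (∀ c ∈ w, PySem.Chars.isspace c = false) →
    p ++ ' ' :: v = w ++ ' ' :: t → p = w := by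
  induction p with
  | nil =>
    intro w v t _ hw h
    cases w with
    | nil => rfl
    | cons e w' =>
      exfalso
      simp only [List.nil_append, List.cons_append, List.cons.injEq] at h
      have := hw e (by simp)
      rw [← h.1] at this
      simp [PySem.Chars.isspace] at this
  | cons a p' ih =>
    intro w v t hp hw h
    cases w with
    | nil =>
      exfalso
      simp only [List.cons_append, List.nil_append, List.cons.injEq] at h
      have := hp a (by simp)
      rw [h.1] at this
      simp [PySem.Chars.isspace] at this
    | cons e w' =>
      simp only [List.cons_append, List.cons.injEq] at h
      obtain ⟨rfl, h'⟩ := h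
      rw [ih w' v t (fun c hc => hp c (List.mem_cons_of_mem _ hc))
        (fun c hc => hw c (List.mem_cons_of_mem _ hc)) h']

lemma infix_skip (w : List Char) :
    ∀ (u q v t : List Char), (∀ c ∈ w, PySem.Chars.isspace c = false) →
    u ++ (' ' :: q) ++ v = w ++ ' ' :: t → (' ' :: q) <:+: (' ' :: t) := by
  induction w with
  | nil =>
    intro u q v t _ h
    exact ⟨u, v, by simpa using h⟩
  | cons e w' ih =>
    intro u q v t hw h
    cases u with
    | nil =>
      exfalso
      simp only [List.nil_append, List.cons_append, List.cons.injEq] at h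
      have := hw e (by simp)
      rw [← h.1] at this
      simp [PySem.Chars.isspace] at this
    | cons a u' =>
      simp only [List.cons_append, List.cons.injEq] at h
      exact ih u' q v t (fun c hc => hw c (List.mem_cons_of_mem _ hc)) (by simpa using h.2)

lemma pad_infix_of_mem (ws : List (List Char)) :
    ∀ p : List Char, p ∈ ws →
    (' ' :: p ++ [' ']) <:+: (' ' :: PySem.Chars.join [' '] ws ++ [' ']) := by
  induction ws with
  | nil => simp
  | cons w rest ih =>
    intro p hmem
    rcases List.mem_cons.mp hmem with rfl | hmem
    · cases rest with
      | nil => rw [PySem.Chars.join_singleton]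
      | cons r rs =>
        rw [PySem.Chars.join_cons_cons]
        exact ⟨[], PySem.Chars.join [' '] (r :: rs) ++ [' '], by simp⟩
    · cases rest with
      | nil => simp at hmem
      | cons r rs =>
        obtain ⟨u, v, huv⟩ := ih p hmem
        rw [PySem.Chars.join_cons_cons]
        refine ⟨' ' :: w ++ u, v, ?_⟩
        simp only [List.cons_append, List.append_assoc] at huv ⊢
        rw [huv]
        simp

lemma pad_infix_mem (ws : List (List Char)) :
    ∀ p : List Char,
    (∀ w ∈ ws, w ≠ [] ∧ ∀ c ∈ w, PySem.Chars.isspace c = false) →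
    p ≠ [] → (∀ c ∈ p, PySem.Chars.isspace c = false) →
    (' ' :: p ++ [' ']) <:+: (' ' :: PySem.Chars.join [' '] ws ++ [' ']) → p ∈ ws := by
  induction ws with
  | nil =>
    intro p _ hp _ h
    exfalso
    have hl := h.length_le
    rw [PySem.Chars.join_nil] at hl
    simp only [List.length_cons, List.length_append, List.length_nil] at hl
    exact hp (List.eq_nil_of_length_eq_zero (by omega))
  | cons w rest ih =>
    intro p hws hp hpc h
    obtain ⟨hwne, hwc⟩ := hws w (by simp)
    cases rest with
    | nil =>
      rw [PySem.Chars.join_singleton] at h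
      obtain ⟨u, v, huv⟩ := h
      cases u with
      | nil =>
        simp only [List.nil_append, List.cons_append, List.append_assoc, List.cons.injEq] at huv
        have heq : p ++ ' ' :: v = w ++ ' ' :: [] := by simpa using huv
        have hpw : p = w := eq_of_words p w v [] hpc hwc heq
        simp [hpw]
      | cons a u' =>
        exfalso
        simp only [List.cons_append, List.cons.injEq] at huv
        have hskip := infix_skip w u' (p ++ [' ']) v [] hwc
          (by simpa [List.append_assoc] using huv.2)
        have hl := hskip.length_le
        simp only [List.length_cons, List.length_append, List.length_nil] at hl
        omega
    | cons r rs =>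
      rw [PySem.Chars.join_cons_cons] at h
      obtain ⟨u, v, huv⟩ := h
      have hshape : ' ' :: (w ++ [' '] ++ PySem.Chars.join [' '] (r :: rs)) ++ [' '] =
          ' ' :: (w ++ ' ' :: (PySem.Chars.join [' '] (r :: rs) ++ [' '])) := by
        simp [List.append_assoc]
      rw [hshape] at huv
      cases u with
      | nil =>
        simp only [List.nil_append, List.cons_append, List.append_assoc, List.cons.injEq] at huv
        have heq : p ++ ' ' :: v = w ++ ' ' :: (PySem.Chars.join [' '] (r :: rs) ++ [' ']) := by
          simpa using huv
        have hpw : p = w := eq_of_words p w v _ hpc hwc heq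
        simp [hpw]
      | cons a u' =>
        simp only [List.cons_append, List.cons.injEq] at huv
        have hskip := infix_skip w u' (p ++ [' ']) v _ hwc
          (by simpa [List.append_assoc] using huv.2)
        exact List.mem_cons_of_mem _
          (ih p (fun x hx => hws x (List.mem_cons_of_mem _ hx)) hp hpc hskip)

lemma wordsL_ok (cs : List Char) :
    ∀ w ∈ (PySem.Chars.split₀ cs).map PySem.Chars.lower,
      w ≠ [] ∧ ∀ c ∈ w, PySem.Chars.isspace c = false := by
  intro w hw
  obtain ⟨w₀, hw₀, rfl⟩ := List.mem_map.mp hw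
  rw [split₀_eq_pvWords] at hw₀
  obtain ⟨hne, hc⟩ := pvWords_ok cs [] (by simp) w₀ hw₀
  constructor
  · simpa [PySem.Chars.lower, List.map_eq_nil_iff] using hne
  · intro c hcmem
    obtain ⟨c₀, hc₀, rfl⟩ := List.mem_map.mp (by simpa [PySem.Chars.lower] using hcmem)
    exact lowerChar_nonspace c₀ (hc c₀ hc₀)

lemma isIn_pad_iff (q p : String) (hp : p.toList ≠ [])
    (hpc : ∀ c ∈ p.toList, PySem.Chars.isspace c = false) :
    PySem.Str.isIn (pvPad p) (pvPad (normalize_py q)) = true ↔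
      p.toList ∈ (PySem.Chars.split₀ q.toList).map PySem.Chars.lower := by
  rw [PySem.Str.isIn_eq]
  unfold pvPad normalize_py
  rw [String.toList_ofList, String.toList_ofList, PySem.Str.toList_lower,
    PySem.Str.toList_join, PySem.Str.split₀_map_toList, PySem.Str.toList_strip]
  have hsep : (" " : String).toList = [' '] := rfl
  rw [hsep, split₀_strip, lower_join, PySem.Chars.isIn_iff_infix]
  exact ⟨pad_infix_mem _ _ (wordsL_ok q.toList) hp hpc, pad_infix_of_mem _ _⟩

lemma mem_words_iff (q p : String) :
    p ∈ (PySem.Str.split₀ q).map PySem.Str.lower ↔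
      p.toList ∈ (PySem.Chars.split₀ q.toList).map PySem.Chars.lower := by
  rw [← PySem.Str.split₀_map_toList, List.map_map]
  constructor
  · intro h
    obtain ⟨a, ha, rfl⟩ := List.mem_map.mp h
    refine List.mem_map.mpr ⟨a, ha, ?_⟩
    simp [PySem.Str.toList_lower]
  · intro h
    obtain ⟨a, ha, hEq⟩ := List.mem_map.mp h
    refine List.mem_map.mpr ⟨a, ha, ?_⟩
    rw [← String.toList_inj, PySem.Str.toList_lower]
    simpa using hEq

lemma alt_iff (q : String) :
    contains_pronoun_reference_py_alt q = true ↔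
      ∃ p ∈ pvPronouns, p ∈ (PySem.Str.split₀ q).map PySem.Str.lower := by
  show (! pvPronouns.isdisjoint (PySem.Set.ofList ((PySem.Str.split₀ q).map PySem.Str.lower))) = true ↔ _
  rw [Bool.not_eq_true', Bool.eq_false_iff, Ne, PySem.Set.isdisjoint_iff]
  push Not
  simp only [PySem.Set.mem_ofList]

-- ===== VERDICT (by name: the statement is the Claim_ definition above) =====
lemma all_nonspace {s : List Char} (h : s.all (fun c => !PySem.Chars.isspace c) = true) :
    ∀ c ∈ s, PySem.Chars.isspace c = false := by
  intro c hc
  simpa using List.all_eq_true.mp h c hc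

theorem contains_pronoun_reference_py_spec : Claim_equal_contains_pronoun_reference_py := by
  intro q _
  show contains_pronoun_reference_py q = contains_pronoun_reference_py_alt q
  have hpron : ∀ p ∈ pvPronouns,
      p.toList ≠ [] ∧ ∀ c ∈ p.toList, PySem.Chars.isspace c = false := by
    intro p hp
    have hlist : pvPronouns = ["it", "this", "that", "them", "those", "these", "its", "their"] := by
      decide
    rw [hlist] at hp
    simp only [List.mem_cons, List.not_mem_nil, or_false] at hp
    rcases hp with rfl | rfl | rfl | rfl | rfl | rfl | rfl | rfl <;>
      exact ⟨by decide, all_nonspace (by decide)⟩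
  rw [Bool.eq_iff_iff, alt_iff]
  show (pvPronouns.any fun p => PySem.Str.isIn (pvPad p) (pvPad (normalize_py q))) = true ↔ _
  rw [List.any_eq_true]
  constructor
  · rintro ⟨p, hpmem, hpin⟩
    obtain ⟨h1, h2⟩ := hpron p hpmem
    exact ⟨p, hpmem, (mem_words_iff q p).mpr ((isIn_pad_iff q p h1 h2).mp hpin)⟩
  · rintro ⟨p, hpmem, hpw⟩
    obtain ⟨h1, h2⟩ := hpron p hpmem
    exact ⟨p, hpmem, (isIn_pad_iff q p h1 h2).mpr ((mem_words_iff q p).mp hpw)⟩
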